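-- pv_equiv track=rewrite | github.com/Jaidev1134/-Web-Based-Optimizing-Mini-Compiler-with-Interactive-AST-Visualization | CD_team19_C-section/code_team19_c-section/ply_compiler.py | _pass_dead_store_elimination
-- ===== SOURCE A (Python) =====
-- def is_valid_var(v):
--     """Return True only for proper identifiers (variable/temp names).
--     Rejects numeric literals, string literals, operators, and keywords."""
--     if not v:
--         return False
--     # Reject numeric literals (int or float)
--     try:
--         float(v)
--         return False
--     except ValueError:
--         pass
--     # Reject string literals (quoted values)
--     if v.startswith('"') or v.startswith("'"):
--         return False
--     # Must be a valid Python identifier (covers a-z, A-Z, _, digits after first char)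
--     return v.isidentifier()
--
-- def _pass_dead_store_elimination(tac, inst_out):
--     """Remove assignments to temporaries whose LHS is not live afterward.
--     Preserved user variables while optimizing away dead intermediate temporaries.
--     """
--     changed = False
--     final_tac = []
--
--     # --- Correctness Fix: Protect all variables used in control flow or as arguments ---
--     # Even if liveness analysis (due to index shifts or edge cases) thinks they are dead,
--     # if they are used as a source in critical ops, we MUST preserve their definition.
--     protected_vars = set()
--     for line in tac:
--         parts = line.split()
--         if not parts: continue
--         # 1. Branch/Return conditions
--         if parts[0] in ("ifFalse", "if") and len(parts) > 1:
--             protected_vars.add(parts[1])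
--         elif parts[0] == "return" and len(parts) > 1:
--             if is_valid_var(parts[1]): protected_vars.add(parts[1])
--         # 2. Call arguments: t = call f, arg
--         elif 'call' in parts and len(parts) >= 5:
--             arg = parts[4].replace(',', '')
--             if is_valid_var(arg): protected_vars.add(arg)
--
--     # --- Safety Shield: Helper to scan for downstream uses ---
--     def has_downstream_use(var, start_idx):
--         for j in range(start_idx + 1, len(tac)):
--             l = tac[j]
--             if l.endswith(":"): continue
--             lp = l.split()
--             if var in lp[1:]: return True
--             if len(lp) >= 2 and lp[1] == '=' and lp[0] == var: return False
--         return False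
--
--     for i, line in enumerate(tac):
--         if line.endswith(":"):
--             final_tac.append(line)
--             continue
--
--         parts = line.split(" ")
--         if len(parts) >= 3 and parts[1] == '=':
--             dest = parts[0]
--             is_call = 'call' in parts
--             if is_valid_var(dest):
--                 # Protection 1: Never remove variables used in upcoming control flow or calls
--                 if dest in protected_vars:
--                     final_tac.append(line)
--                     continue
--
--                 # Protection 2: Standard liveness-based elimination for temporaries
--                 is_temp = len(dest) > 1 and dest[0] == 't' and (dest[1:].isdigit() or dest.startswith("t_hoist_"))
--                 if is_temp and not is_call:
--                     # Check OUT set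
--                     is_live = dest in inst_out.get(i, set())
--                     # If not live in OUT, do the Safety Shield Scan
--                     if not is_live:
--                         if has_downstream_use(dest, i):
--                             final_tac.append(line)
--                             continue
--                         else:
--                             changed = True
--                             continue
--         final_tac.append(line)
--
--     return changed, final_tac
-- ===== SOURCE B (Python) =====
-- def is_valid_var(v):
--     if not v:
--         return False
--     try:
--         float(v)
--         return False
--     except ValueError:
--         pass
--     if v.startswith('"') or v.startswith("'"):
--         return False
--     return v.isidentifier()
--
-- def _pass_dead_store_elimination(tac, inst_out):
--     protected_vars = set()
--     for line in tac:
--         parts = line.split()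
--         if not parts: continue
--         if parts[0] in ("ifFalse", "if") and len(parts) > 1:
--             protected_vars.add(parts[1])
--         elif parts[0] == "return" and len(parts) > 1:
--             if is_valid_var(parts[1]): protected_vars.add(parts[1])
--         elif 'call' in parts and len(parts) >= 5:
--             arg = parts[4].replace(',', '')
--             if is_valid_var(arg): protected_vars.add(arg)
--
--     # One backward pass: live[v] answers "v is used downstream before being
--     # re-defined" for the already-processed suffix, so no per-line rescans.
--     changed = False
--     out_rev = []
--     live = {}
--     for i in range(len(tac) - 1, -1, -1):
--         line = tac[i]
--         if line.endswith(":"):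
--             out_rev.append(line)
--             continue
--         parts = line.split(" ")
--         drop = False
--         if len(parts) >= 3 and parts[1] == '=':
--             dest = parts[0]
--             if (is_valid_var(dest) and dest not in protected_vars
--                     and 'call' not in parts
--                     and len(dest) > 1 and dest[0] == 't'
--                     and (dest[1:].isdigit() or dest.startswith("t_hoist_"))
--                     and dest not in inst_out.get(i, set())
--                     and not live.get(dest, False)):
--                 drop = True
--         lp = line.split()
--         if len(lp) >= 2 and lp[1] == '=':
--             live[lp[0]] = False
--         for v in lp[1:]:
--             live[v] = True
--         if drop:
--             changed = True
--         else:
--             out_rev.append(line)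
--     return changed, out_rev[::-1]
-- ===== Notes on version B (the rewrite author's own statement) =====
-- stated objective: alternative
-- what changed: A rescans all downstream lines (has_downstream_use) for every candidate dead store; B does one backward pass over the TAC maintaining a per-variable liveness dictionary (use-before-redefinition), so each line is processed once with no rescans.
import Mathlib
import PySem

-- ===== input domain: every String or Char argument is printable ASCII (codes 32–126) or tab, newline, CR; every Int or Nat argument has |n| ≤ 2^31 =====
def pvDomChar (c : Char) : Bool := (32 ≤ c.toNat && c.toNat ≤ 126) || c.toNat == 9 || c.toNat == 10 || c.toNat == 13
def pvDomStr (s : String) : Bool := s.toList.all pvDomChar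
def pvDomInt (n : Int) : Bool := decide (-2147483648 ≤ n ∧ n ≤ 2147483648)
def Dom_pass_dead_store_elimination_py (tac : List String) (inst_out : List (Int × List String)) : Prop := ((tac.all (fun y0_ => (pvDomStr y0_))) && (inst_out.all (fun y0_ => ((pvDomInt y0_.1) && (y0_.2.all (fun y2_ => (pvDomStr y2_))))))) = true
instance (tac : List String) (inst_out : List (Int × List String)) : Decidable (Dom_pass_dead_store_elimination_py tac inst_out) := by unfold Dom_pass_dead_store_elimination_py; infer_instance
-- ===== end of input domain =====

-- B replaces A's per-line downstream rescans by ONE backward pass maintaining a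
-- per-variable liveness dictionary (objective: alternative, single-pass algorithm).

-- ===== PORT A =====
-- shared module helper is_valid_var (used verbatim by both Pythons).
-- float(v): hand-written recognizer of Python's float-literal acceptance
-- (sign, inf/infinity/nan, digits with single underscores between digits,
-- optional '.', optional exponent); exact on the printable-ASCII domain,
-- exhaustively tested against CPython.

-- digit run: a digit already consumed; keeps consuming digits, a '_' only between digits
def pvDigTail : List Char → List Char
  | '_' :: c :: rest => if PySem.Chars.isdigit c then pvDigTail rest else '_' :: c :: rest
  | c :: rest => if PySem.Chars.isdigit c then pvDigTail rest else c :: rest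
  | [] => []

-- consume 'digit (("_")? digit)*'; none if no leading digit; some = the remainder
def pvConsumeDigits : List Char → Option (List Char)
  | c :: rest => if PySem.Chars.isdigit c then some (pvDigTail rest) else none
  | [] => none

def pvDropSign : List Char → List Char
  | c :: rest => if c = '+' ∨ c = '-' then rest else c :: rest
  | [] => []

-- the remainder after the mantissa: empty, or 'e' sign? digits (input already lowercased)
def pvAfterExp : List Char → Bool
  | [] => true
  | c :: rest => c = 'e' && (pvConsumeDigits (pvDropSign rest) == some [])

def pvFloatNum (cs : List Char) : Bool :=
  match pvConsumeDigits cs with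
  | some r =>
    match r with
    | '.' :: r1 =>
      (match pvConsumeDigits r1 with
       | some r2 => pvAfterExp r2
       | none => pvAfterExp r1)
    | _ => pvAfterExp r
  | none =>
    match cs with
    | '.' :: r1 =>
      (match pvConsumeDigits r1 with
       | some r2 => pvAfterExp r2
       | none => false)
    | _ => false

-- True iff Python's float(v) succeeds (v in the ASCII domain)
def pvFloatOk (cs : List Char) : Bool :=
  let t := pvDropSign (PySem.Chars.lower (PySem.Chars.strip cs))
  t == "inf".toList || t == "infinity".toList || t == "nan".toList || pvFloatNum t

-- v.isidentifier() on the ASCII domain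
def pvIsIdentChar (c : Char) : Bool := PySem.Chars.isalpha c || PySem.Chars.isdigit c || c = '_'
def pvIsIdentifier : List Char → Bool
  | [] => false
  | c :: rest => (PySem.Chars.isalpha c || c = '_') && rest.all pvIsIdentChar

def pyIsValidVar (v : String) : Bool :=
  let cs := v.toList
  if cs = [] then false
  else if pvFloatOk cs then false
  else if PySem.Chars.startswith cs ['"'] || PySem.Chars.startswith cs ['\''] then false
  else pvIsIdentifier cs

-- protected_vars pre-pass (identical in both Pythons)
def pvProtectedStep (acc : PySem.Set String) (line : String) : PySem.Set String :=
  let parts := PySem.Str.split₀ line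
  if parts.isEmpty then acc
  else if (parts.getD 0 "" = "ifFalse" ∨ parts.getD 0 "" = "if") ∧ 1 < parts.length then
    PySem.Set.add acc (parts.getD 1 "")
  else if parts.getD 0 "" = "return" ∧ 1 < parts.length then
    (if pyIsValidVar (parts.getD 1 "") then PySem.Set.add acc (parts.getD 1 "") else acc)
  else if parts.contains "call" ∧ 5 ≤ parts.length then
    (let arg := PySem.Str.replace (parts.getD 4 "") "," ""
     if pyIsValidVar arg then PySem.Set.add acc arg else acc)
  else acc

def pvProtectedVars (tac : List String) : PySem.Set String := tac.foldl pvProtectedStep []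

-- line.split(" "): sep is the nonempty literal " ", so split? is always `some`
def pvSplitSpace (line : String) : List String := (PySem.Str.split? line " ").getD []

-- inst_out.get(i, set()) membership: dict as association list, first match
def pvInstGet (inst : List (Int × List String)) (i : Int) : List String :=
  match inst.find? (fun p => p.1 == i) with
  | some p => p.2
  | none => []

-- is_temp test of A's main loop (len(dest)>1 and dest[0]=='t' and (dest[1:].isdigit() or dest.startswith("t_hoist_")))
def pvIsTemp (dest : String) : Bool :=
  let cs := dest.toList
  decide (1 < cs.length) && (cs.getD 0 ' ' = 't')
    && (PySem.Chars.strIsdigit (cs.drop 1) || PySem.Chars.startswith cs "t_hoist_".toList)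

-- A's has_downstream_use: scan of the lines after the current one (early returns as recursion)
def pvAScan : List String → String → Bool
  | [], _ => false
  | l :: rest, var =>
    if PySem.Str.endswith l ":" then pvAScan rest var
    else
      let lp := PySem.Str.split₀ l
      if (lp.drop 1).contains var then true
      else if 2 ≤ lp.length ∧ lp.getD 1 "" = "=" ∧ lp.getD 0 "" = var then false
      else pvAScan rest var

-- A's main forward loop: rem is the suffix of tac starting at index i; acc is final_tac so far
def pvALoop (tac : List String) (inst : List (Int × List String)) (prot : PySem.Set String) :
    Nat → List String → Bool → List String → Bool × List String
  | _, [], changed, acc => (changed, acc)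
  | i, line :: rest, changed, acc =>
    if PySem.Str.endswith line ":" then pvALoop tac inst prot (i + 1) rest changed (acc ++ [line])
    else
      let parts := pvSplitSpace line
      let dropIt : Bool :=
        if 3 ≤ parts.length ∧ parts.getD 1 "" = "=" then
          let dest := parts.getD 0 ""
          let isCall := parts.contains "call"
          if pyIsValidVar dest then
            if PySem.Set.contains prot dest then false
            else if pvIsTemp dest && !isCall then
              let isLive := (pvInstGet inst (i : Int)).contains dest
              if !isLive then
                (if pvAScan (tac.drop (i + 1)) dest then false else true)
              else false
            else false
          else false
        else false
      if dropIt then pvALoop tac inst prot (i + 1) rest true acc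
      else pvALoop tac inst prot (i + 1) rest changed (acc ++ [line])

def pass_dead_store_elimination_py (tac : List String) (inst_out : List (Int × List String)) : Bool × List String :=
  pvALoop tac inst_out (pvProtectedVars tac) 0 tac false []

-- ===== PORT B =====
-- B's liveness-dictionary update for one line (def first, then uses override)
def pvBUpdate (live : PySem.Dict String Bool) (lp : List String) : PySem.Dict String Bool :=
  let live1 := if 2 ≤ lp.length ∧ lp.getD 1 "" = "=" then live.insert (lp.getD 0 "") false else live
  (lp.drop 1).foldl (fun d v => d.insert v true) live1

-- B's single backward pass: returns (liveness dict, changed, kept lines) for the suffix at index i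
def pvBRec (inst : List (Int × List String)) (prot : PySem.Set String) :
    Nat → List String → PySem.Dict String Bool × Bool × List String
  | _, [] => (PySem.Dict.empty, false, [])
  | i, line :: rest =>
    let s := pvBRec inst prot (i + 1) rest
    let live := s.1
    if PySem.Str.endswith line ":" then (live, s.2.1, line :: s.2.2)
    else
      let parts := pvSplitSpace line
      let dest := parts.getD 0 ""
      let dropIt : Bool :=
        decide (3 ≤ parts.length) && decide (parts.getD 1 "" = "=")
          && pyIsValidVar dest && !PySem.Set.contains prot dest
          && !parts.contains "call" && pvIsTemp dest
          && !(pvInstGet inst (i : Int)).contains dest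
          && !live.getD dest false
      let live' := pvBUpdate live (PySem.Str.split₀ line)
      if dropIt then (live', true, s.2.2) else (live', s.2.1, line :: s.2.2)

def pass_dead_store_elimination_py_alt (tac : List String) (inst_out : List (Int × List String)) : Bool × List String :=
  let s := pvBRec inst_out (pvProtectedVars tac) 0 tac
  (s.2.1, s.2.2)

-- ===== PRECONDITION & SPEC =====
def Spec_pass_dead_store_elimination_py (tac : List String) (inst_out : List (Int × List String)) (out : Bool × List String) : Prop := out = pass_dead_store_elimination_py_alt tac inst_out
instance (tac : List String) (inst_out : List (Int × List String)) (out : Bool × List String) : Decidable (Spec_pass_dead_store_elimination_py tac inst_out out) := by unfold Spec_pass_dead_store_elimination_py; infer_instance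

-- ===== CLAIM (what is proved, stated in full; the proofs are below) =====
def Claim_equal_pass_dead_store_elimination_py : Prop := ∀ (tac : List String) (inst_out : List (Int × List String)), Dom_pass_dead_store_elimination_py tac inst_out → Spec_pass_dead_store_elimination_py tac inst_out (pass_dead_store_elimination_py tac inst_out)

-- ===== LEMMAS AND PROOFS =====

-- looking a variable up after the uses of a line were inserted as live
theorem pvFoldlInsertTrue_getD (us : List String) (d : PySem.Dict String Bool) (var : String) :
    (us.foldl (fun d v => d.insert v true) d).getD var false
      = if us.contains var then true else d.getD var false := by
  induction us generalizing d with
  | nil => simp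
  | cons u us ih =>
    simp only [List.foldl_cons, ih, List.contains_cons]
    by_cases h : var = u
    · subst h; simp
    · simp [PySem.Dict.getD_insert, h]

-- the dictionary after one line update answers exactly one step of A's scan
theorem pvBUpdate_getD (live : PySem.Dict String Bool) (lp : List String) (var : String) :
    (pvBUpdate live lp).getD var false
      = if (lp.drop 1).contains var then true
        else if 2 ≤ lp.length ∧ lp.getD 1 "" = "=" ∧ lp.getD 0 "" = var then false
        else live.getD var false := by
  unfold pvBUpdate
  rw [pvFoldlInsertTrue_getD]
  by_cases hu : (lp.drop 1).contains var = true
  · rw [if_pos hu, if_pos hu]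
  · rw [if_neg hu, if_neg hu]
    by_cases hd : 2 ≤ lp.length ∧ lp.getD 1 "" = "="
    · rw [if_pos hd, PySem.Dict.getD_insert]
      by_cases hv : lp.getD 0 "" = var
      · rw [if_pos hv.symm, if_pos ⟨hd.1, hd.2, hv⟩]
      · rw [if_neg (fun h => hv h.symm), if_neg (fun h => hv h.2.2)]
    · rw [if_neg hd, if_neg (fun h : _ ∧ _ ∧ _ => hd ⟨h.1, h.2.1⟩)]

-- the backward liveness dictionary computes A's downstream-use scan
theorem pvBRec_live (inst : List (Int × List String)) (prot : PySem.Set String)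
    (rest : List String) (i : Nat) (var : String) :
    (pvBRec inst prot i rest).1.getD var false = pvAScan rest var := by
  induction rest generalizing i with
  | nil => simp [pvBRec, pvAScan]
  | cons l rest ih =>
    rw [pvBRec, pvAScan]
    by_cases hc : PySem.Str.endswith l ":"
    · simp only [hc, if_true]; exact ih (i + 1)
    · simp only [hc, if_false, Bool.false_eq_true]
      split <;> · rw [pvBUpdate_getD, ih (i + 1)]

-- the two drop decisions agree: A's nested-if chain is B's conjunction
theorem pvDropDecEq (p1 p2 : Prop) [Decidable p1] [Decidable p2] (b3 b4 b5 b6 b7 b8 : Bool) :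
    (if p1 ∧ p2 then
       if b3 then
         (if b4 then false
          else if b6 && !b5 then (if !b7 then (if b8 then false else true) else false)
          else false)
       else false
     else false)
    = (decide p1 && decide p2 && b3 && !b4 && !b5 && b6 && !b7 && !b8) := by
  by_cases h1 : p1 <;> by_cases h2 : p2 <;>
    cases b3 <;> cases b4 <;> cases b5 <;> cases b6 <;> cases b7 <;> cases b8 <;>
    simp [h1, h2]

-- A's forward loop equals B's backward recursion (rem is tac's suffix at index i)
theorem pvALoop_eq_pvBRec (tac : List String) (inst : List (Int × List String))
    (prot : PySem.Set String) (rem : List String) (i : Nat) (changed : Bool) (acc : List String)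
    (hrem : tac.drop i = rem) :
    pvALoop tac inst prot i rem changed acc
      = ((changed || (pvBRec inst prot i rem).2.1), acc ++ (pvBRec inst prot i rem).2.2) := by
  induction rem generalizing i changed acc with
  | nil => simp [pvALoop, pvBRec]
  | cons line rest ih =>
    have hrest : tac.drop (i + 1) = rest := by
      rw [← List.tail_drop, hrem]; rfl
    rw [pvALoop, pvBRec]
    by_cases hc : PySem.Str.endswith line ":" = true
    · rw [if_pos hc, if_pos hc]
      rw [ih (i + 1) changed (acc ++ [line]) hrest]
      simp
    · rw [if_neg hc, if_neg hc]
      simp only [hrest, pvBRec_live, pvDropDecEq]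
      split
      · rw [ih (i + 1) true acc hrest]; simp
      · rw [ih (i + 1) changed (acc ++ [line]) hrest]; simp

-- ===== VERDICT (by name: the statement is the Claim_ definition above) =====
theorem pass_dead_store_elimination_py_spec : Claim_equal_pass_dead_store_elimination_py := by
  intro tac inst_out _
  unfold Spec_pass_dead_store_elimination_py pass_dead_store_elimination_py pass_dead_store_elimination_py_alt
  rw [pvALoop_eq_pvBRec tac inst_out (pvProtectedVars tac) tac 0 false [] rfl]
  simp
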